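-- pv_equiv track=rewrite | github.com/trajectoryRL/trajectoryRL | trajectoryrl/utils/pack_ownership.py | evict_orphans
-- ===== SOURCE A (Python) =====
-- from typing import Dict, Iterable, List, Tuple
--
-- EVICTION_GRACE_WINDOWS = 7
--
-- PackOwnershipTable = Dict[str, Tuple[str, int]]
--
-- PackLastSeenWindow = Dict[str, int]
--
-- def evict_orphans(
--     table: PackOwnershipTable,
--     last_seen: PackLastSeenWindow,
--     active_hashes: Iterable[str],
--     current_window: int,
--     grace_windows: int = EVICTION_GRACE_WINDOWS,
-- ) -> List[str]:
--     """Drop entries whose pack_hash has been inactive for the grace span.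
--
--     Mutates both ``table`` and ``last_seen`` in place:
--
--     * For every ``pack_hash`` in ``active_hashes`` that is also in
--       ``table``: refresh ``last_seen[ph] = current_window``. Any prior
--       grace clock is reset.
--     * For every ``pack_hash`` in ``table`` that is NOT in
--       ``active_hashes``: if no ``last_seen`` entry exists yet (e.g.
--       newly-claimed entry that races out before a refresh, or a v1
--       legacy entry just migrated), start the clock at
--       ``current_window``. Otherwise, evict iff
--       ``current_window - last_seen[ph] >= grace_windows``.
--
--     Returns the list of evicted pack_hashes (in iteration order) for
--     logging / metrics. ``active_hashes`` may be any iterable; it is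
--     materialized into a set internally for O(1) lookup.
--     """
--     active = set(active_hashes)
--
--     for ph in active:
--         if ph in table:
--             last_seen[ph] = current_window
--
--     evicted: List[str] = []
--     for ph in list(table.keys()):
--         if ph in active:
--             continue
--         seen_at = last_seen.get(ph)
--         if seen_at is None:
--             last_seen[ph] = current_window
--             continue
--         if current_window - seen_at >= grace_windows:
--             table.pop(ph, None)
--             last_seen.pop(ph, None)
--             evicted.append(ph)
--     return evicted
-- ===== SOURCE B (Python) =====
-- EVICTION_GRACE_WINDOWS = 7
--
-- def evict_orphans(
--     table,
--     last_seen,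
--     active_hashes,
--     current_window,
--     grace_windows=EVICTION_GRACE_WINDOWS,
-- ):
--     """Decide evictions declaratively from a pre-refresh snapshot of the
--     grace clocks, then apply all mutations in separate bulk passes."""
--     active = set(active_hashes)
--     snapshot = dict(last_seen)  # grace clocks before any refresh
--     evicted = [
--         ph
--         for ph in table
--         if ph not in active
--         and ph in snapshot
--         and current_window - snapshot[ph] >= grace_windows
--     ]
--     for ph in evicted:
--         del table[ph]
--         del last_seen[ph]
--     for ph in table:
--         if ph in active or ph not in snapshot:
--             last_seen[ph] = current_window
--     return evicted
-- ===== Notes on version B (the rewrite author's own statement) =====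
-- stated objective: simpler
-- what changed: Replaces A's two interleaved mutate-as-you-go loops (refresh pass, then a scan that pops from the dicts while deciding) with a single declarative filter of the table keys against a pre-refresh snapshot of the grace clocks, followed by separate bulk mutation passes.
import Mathlib
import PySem

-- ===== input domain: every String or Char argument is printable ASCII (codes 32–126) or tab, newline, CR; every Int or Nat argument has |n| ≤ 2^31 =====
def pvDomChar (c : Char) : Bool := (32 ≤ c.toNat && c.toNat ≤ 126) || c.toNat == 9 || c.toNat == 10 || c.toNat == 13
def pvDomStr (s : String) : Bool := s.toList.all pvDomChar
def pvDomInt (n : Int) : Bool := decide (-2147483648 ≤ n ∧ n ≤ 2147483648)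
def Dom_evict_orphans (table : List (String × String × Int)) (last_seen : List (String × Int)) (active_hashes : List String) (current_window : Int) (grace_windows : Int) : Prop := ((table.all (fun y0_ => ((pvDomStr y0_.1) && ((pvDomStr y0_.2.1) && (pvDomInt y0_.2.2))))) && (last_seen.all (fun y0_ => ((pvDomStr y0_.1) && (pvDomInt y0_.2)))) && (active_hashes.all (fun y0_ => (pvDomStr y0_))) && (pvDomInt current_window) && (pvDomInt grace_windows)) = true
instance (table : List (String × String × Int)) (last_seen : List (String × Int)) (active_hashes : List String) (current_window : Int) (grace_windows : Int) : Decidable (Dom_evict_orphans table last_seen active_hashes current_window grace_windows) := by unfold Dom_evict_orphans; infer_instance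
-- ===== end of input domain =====

-- B decides the evictions declaratively by filtering the table keys against a pre-refresh
-- snapshot of the grace clocks, instead of A's two interleaved mutate-as-you-go loops.
-- Both A and B mutate `table` and `last_seen` in place (B performs the same mutations);
-- the equivalence proved here is about the RETURN value (the evicted list).

-- ===== PORT A =====
-- Transliteration of A. The first loop iterates over the Python set `active`; its order is
-- not modelled by PySem.Set, but the loop only overwrites last_seen values at active keys,
-- and the returned list does not depend on that order.
def evict_orphans (table : List (String × String × Int)) (last_seen : List (String × Int)) (active_hashes : List String) (current_window : Int) (grace_windows : Int) : List String :=
  let tbl : PySem.Dict String (String × Int) := PySem.Dict.ofList table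
  let ls0 : PySem.Dict String Int := PySem.Dict.ofList last_seen
  let active : PySem.Set String := PySem.Set.ofList active_hashes
  -- for ph in active: if ph in table: last_seen[ph] = current_window
  let ls1 : PySem.Dict String Int :=
    active.foldl (fun d ph => if tbl.contains ph then d.insert ph current_window else d) ls0
  -- for ph in list(table.keys()): …  (state = (table, last_seen, evicted))
  let fin :=
    tbl.keys.foldl
      (fun (st : PySem.Dict String (String × Int) × PySem.Dict String Int × List String) ph =>
        if active.contains ph then st
        else
          match st.2.1.get? ph with
          | none => (st.1, st.2.1.insert ph current_window, st.2.2)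
          | some seen_at =>
            if grace_windows ≤ current_window - seen_at then
              (st.1.erase ph, st.2.1.erase ph, st.2.2 ++ [ph])
            else st)
      (tbl, ls1, [])
  fin.2.2

-- ===== PORT B =====
def evict_orphans_alt (table : List (String × String × Int)) (last_seen : List (String × Int)) (active_hashes : List String) (current_window : Int) (grace_windows : Int) : List String :=
  let active : PySem.Set String := PySem.Set.ofList active_hashes
  let snapshot : PySem.Dict String Int := PySem.Dict.ofList last_seen
  (PySem.Dict.ofList table).keys.filter
    (fun ph =>
      !active.contains ph &&
        match snapshot.get? ph with
        | some seen => decide (grace_windows ≤ current_window - seen)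
        | none => false)

-- ===== PRECONDITION & SPEC =====
def Spec_evict_orphans (table : List (String × String × Int)) (last_seen : List (String × Int)) (active_hashes : List String) (current_window : Int) (grace_windows : Int) (out : List String) : Prop := out = evict_orphans_alt table last_seen active_hashes current_window grace_windows
instance (table : List (String × String × Int)) (last_seen : List (String × Int)) (active_hashes : List String) (current_window : Int) (grace_windows : Int) (out : List String) : Decidable (Spec_evict_orphans table last_seen active_hashes current_window grace_windows out) := by unfold Spec_evict_orphans; infer_instance

-- ===== CLAIM (what is proved, stated in full; the proofs are below) =====
def Claim_equal_evict_orphans : Prop := ∀ (table : List (String × String × Int)) (last_seen : List (String × Int)) (active_hashes : List String) (current_window : Int) (grace_windows : Int), Dom_evict_orphans table last_seen active_hashes current_window grace_windows → Spec_evict_orphans table last_seen active_hashes current_window grace_windows (evict_orphans table last_seen active_hashes current_window grace_windows)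

-- ===== LEMMAS AND PROOFS =====

theorem get?_erase_of_ne {ν : Type} (d : PySem.Dict String ν) (k k' : String) (h : k' ≠ k) :
    (d.erase k).get? k' = d.get? k' := by
  have hf : (fun a : String × ν => !decide (a.1 = k) && decide (a.1 = k')) = (fun p : String × ν => p.1 == k') := by
    funext a; by_cases hh : a.1 = k' <;> simp [hh, h]
  simp only [PySem.Dict.get?, PySem.Dict.erase, List.find?_filter, Bool.not_eq_eq_eq_not, Bool.not_true,
    beq_eq_false_iff_ne, ne_eq, beq_iff_eq, Bool.decide_and, decide_not]
  rw [hf]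

-- A's first loop only writes keys drawn from the list it iterates; lookups elsewhere are unchanged.
theorem get?_refresh_loop (l : List String) (d : PySem.Dict String Int) (cw : Int)
    (c : String → Bool) (ph : String) (hph : ph ∉ l) :
    (l.foldl (fun d x => if c x then d.insert x cw else d) d).get? ph = d.get? ph := by
  induction l generalizing d with
  | nil => rfl
  | cons x xs ih =>
    simp only [List.foldl_cons]
    have hx : ph ≠ x := fun h => hph (h ▸ List.mem_cons_self)
    have hxs : ph ∉ xs := fun h => hph (List.mem_cons_of_mem _ h)
    by_cases hc : c x = true
    · rw [hc]; simp only [if_true]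
      rw [ih _ hxs, PySem.Dict.get?_insert_of_ne _ _ hx]
    · simp only [hc]; exact ih _ hxs

-- The invariant of A's second loop: on the keys still to be processed (nodup, so never
-- written before their turn), the live `last_seen` agrees with the snapshot `snap`, and
-- the evicted accumulator grows exactly by the keys B's filter keeps.
theorem eviction_loop_eq (active : PySem.Set String) (cw gw : Int) (snap : PySem.Dict String Int)
    (ks : List String) (t : PySem.Dict String (String × Int)) (ls : PySem.Dict String Int)
    (ev : List String) (hnd : ks.Nodup)
    (hinv : ∀ ph ∈ ks, active.contains ph = false → ls.get? ph = snap.get? ph) :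
    (ks.foldl
      (fun (st : PySem.Dict String (String × Int) × PySem.Dict String Int × List String) ph =>
        if active.contains ph then st
        else
          match st.2.1.get? ph with
          | none => (st.1, st.2.1.insert ph cw, st.2.2)
          | some seen_at =>
            if gw ≤ cw - seen_at then (st.1.erase ph, st.2.1.erase ph, st.2.2 ++ [ph])
            else st)
      (t, ls, ev)).2.2 =
    ev ++ ks.filter (fun ph =>
      !active.contains ph &&
        match snap.get? ph with
        | some seen => decide (gw ≤ cw - seen)
        | none => false) := by
  induction ks generalizing t ls ev with
  | nil => simp
  | cons ph ks ih =>
    have hnd' : ks.Nodup := hnd.of_cons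
    have hph : ph ∉ ks := (List.nodup_cons.mp hnd).1
    have hne : ∀ x ∈ ks, x ≠ ph := fun x hx h => hph (h ▸ hx)
    simp only [List.foldl_cons, List.filter_cons]
    by_cases ha : active.contains ph = true
    · rw [ha]; simp only [if_true, Bool.not_true, Bool.false_and]
      exact ih t ls ev hnd' (fun x hx hc => hinv x (List.mem_cons_of_mem _ hx) hc)
    · have ha' : active.contains ph = false := by simpa using ha
      rw [ha']; simp only [Bool.false_eq_true, if_false, Bool.not_false, Bool.true_and]
      have hls : ls.get? ph = snap.get? ph := hinv ph List.mem_cons_self ha'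
      rw [hls]
      cases hsn : snap.get? ph with
      | none =>
        simp only []
        exact ih t (ls.insert ph cw) ev hnd' (fun x hx hc => by
          rw [PySem.Dict.get?_insert_of_ne _ _ (hne x hx)]
          exact hinv x (List.mem_cons_of_mem _ hx) hc)
      | some seen =>
        by_cases hg : gw ≤ cw - seen
        · simp only [hg, if_true, decide_true]
          rw [ih (t.erase ph) (ls.erase ph) (ev ++ [ph]) hnd' (fun x hx hc => by
            rw [get?_erase_of_ne _ _ _ (hne x hx)]
            exact hinv x (List.mem_cons_of_mem _ hx) hc)]
          simp
        · simp only [hg, if_false, decide_false]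
          exact ih t ls ev hnd' (fun x hx hc => hinv x (List.mem_cons_of_mem _ hx) hc)

-- ===== VERDICT (by name: the statement is the Claim_ definition above) =====
theorem evict_orphans_spec : Claim_equal_evict_orphans := by
  intro table last_seen active_hashes cw gw _
  unfold Spec_evict_orphans evict_orphans evict_orphans_alt
  simp only []
  apply eviction_loop_eq
  · exact PySem.Dict.nodup_keys_ofList table
  · intro ph _ hc
    apply get?_refresh_loop
    intro hmem
    rw [show (PySem.Set.ofList active_hashes).contains ph = true from by
      simpa [PySem.Set.contains] using hmem] at hc
    simp at hc
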